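-- pv_equiv track=rewrite | github.com/Leung-Hiufung/comp7505 | warmup/warmup.py | k_cool
-- ===== SOURCE A (Python) =====
-- def k_cool(k: int, n: int) -> int:
--     """
--     Return the n-th largest k-cool number for the given @n@ and @k@.
--     The result can be large, so return the remainder of division of the result
--     by 10^16 + 61 (this constant is provided).
--
--     Limitations:
--         "It works":
--             2 <= k <= 128
--             1 <= n <= 10000
--         "Exhaustive":
--             2 <= k <= 10^16
--             1 <= n <= 10^100     (yes, that's ten to the power of one hundred)
--         "Welcome to COMP3506":
--             2 <= k <= 10^42
--             1 <= n <= 10^100000  (yes, that's ten to the power of one hundred thousand)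
--
--     Examples:
--     k_cool(2, 1) == 1                     # The first 2-cool number is 2^0 = 1
--     k_cool(2, 3) == 3                     # The third 2-cool number is 2^1 + 2^0 = 3
--     k_cool(3, 5) == 10                    # The fifth 3-cool number is 3^2 + 3^0 = 10
--     k_cool(10, 42) == 101010
--     k_cool(128, 5000) == 9826529652304384 # The actual result is larger than 10^16 + 61,
--                                           # so k_cool returns the remainder of division by 10^16 + 61
--     """
--
--     MODULUS = 10**16 + 61
--
--     # Use Mathematical approach,
--     # From small to large, take n=1~16 as example, each digit in number indicate the addends' powers
--     # 0, 1, 10, 2, 20, 21, 210, 3, 30, 31, 310, 32, 320, 321, 3210.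
--     # Use binary to encode the number, 1 means occur, 0 mean absence
--     # **** each digit stands for the existence of the power (3,2,1,0)
--     # 0000, 0001, 0010, 0011, 0100, 0101, 0110, 0111, 1000, 1001, 1010, 1011, 1100, 1101, 1110, 1111
--     # exactly encodes to binary number 0-15
--
--     # addend_amount = int(math.log2(n)) + 1
--     # binary_str = f"{(n):0b}"
--     # answer = 0
--     # for index, char in enumerate(binary_str):
--     #     bit = 0 if char == "0" else 1
--     #     answer += bit * k ** (addend_amount - index - 1)
--     # return answer % MODULUS
--
--     result = 0
--     power = 1  # power is the result of k^n, initial is k^0 =1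
--     while n > 0:
--         # calculate last bit each iteration
--         if n & 1:
--             # if n is odd, then the bit is 1, this power exists, add k^i, 0<=i<max_power
--             result += power
--             result %= MODULUS
--         # calculate next iteration's result, which is k^(i+1)
--         power *= k
--         power %= MODULUS
--         # n divided by 2
--         n >>= 1
--
--     return result
-- ===== SOURCE B (Python) =====
-- def k_cool(k: int, n: int) -> int:
--     """n-th k-cool number mod 10**16+61, by Horner's method over n's bits MSB-first."""
--     MODULUS = 10**16 + 61
--     if n <= 0:
--         return 0
--     result = 0
--     for ch in bin(n)[2:]:
--         result = (result * k + (1 if ch == "1" else 0)) % MODULUS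
--     return result
-- ===== Notes on version B (the rewrite author's own statement) =====
-- stated objective: alternative
-- what changed: B walks n's bits most-significant-first and maintains the running polynomial value by Horner's method (result = result*k + bit, mod M), instead of A's LSB-first loop that maintains an explicit power of k.
import Mathlib
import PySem

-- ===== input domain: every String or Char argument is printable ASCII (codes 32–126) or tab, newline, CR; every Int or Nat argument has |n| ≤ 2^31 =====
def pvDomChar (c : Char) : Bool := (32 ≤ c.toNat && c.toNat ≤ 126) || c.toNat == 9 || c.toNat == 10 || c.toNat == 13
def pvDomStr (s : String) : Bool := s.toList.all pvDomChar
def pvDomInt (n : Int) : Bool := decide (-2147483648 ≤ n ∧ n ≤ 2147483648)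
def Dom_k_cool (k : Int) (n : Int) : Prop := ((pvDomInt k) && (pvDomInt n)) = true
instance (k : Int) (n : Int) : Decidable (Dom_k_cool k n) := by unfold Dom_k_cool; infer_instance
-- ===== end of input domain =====

-- B replaces A's LSB-first power-accumulator loop by Horner's method over n's bits MSB-first (alternative decomposition, same cost).


def pvM : Int := 10 ^ 16 + 61

-- ===== PORT A =====
-- A's while-loop: n is nonnegative once the loop runs (n ≤ 0 exits at once), so the
-- loop state is carried over n's Nat value; `n & 1` is `n % 2 = 1`, `n >>= 1` is `n / 2`.
def kcAux (k : Int) (n : Nat) (result power : Int) : Int :=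
  if n = 0 then result
  else
    kcAux k (n / 2)
      (if n % 2 = 1 then (result + power) % pvM else result)
      (power * k % pvM)
termination_by n
decreasing_by exact Nat.div_lt_self (Nat.pos_of_ne_zero (by assumption)) (by norm_num)

def k_cool (k : Int) (n : Int) : Int := kcAux k n.toNat 0 1

-- ===== PORT B =====
-- bin(n)[2:] for n > 0: n's binary digits most-significant-first (true = '1')
def msbBits (n : Nat) : List Bool :=
  if n = 0 then [] else msbBits (n / 2) ++ [decide (n % 2 = 1)]
termination_by n
decreasing_by exact Nat.div_lt_self (Nat.pos_of_ne_zero (by assumption)) (by norm_num)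

def hstep (k : Int) (r : Int) (b : Bool) : Int := (r * k + (if b then 1 else 0)) % pvM

def k_cool_alt (k : Int) (n : Int) : Int :=
  if n ≤ 0 then 0 else (msbBits n.toNat).foldl (hstep k) 0

-- ===== PRECONDITION & SPEC =====
def Spec_k_cool (k : Int) (n : Int) (out : Int) : Prop := out = k_cool_alt k n
instance (k : Int) (n : Int) (out : Int) : Decidable (Spec_k_cool k n out) := by unfold Spec_k_cool; infer_instance

-- ===== CLAIM (what is proved, stated in full; the proofs are below) =====
def Claim_equal_k_cool : Prop := ∀ (k : Int) (n : Int), Dom_k_cool k n → Spec_k_cool k n (k_cool k n)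

-- ===== LEMMAS AND PROOFS =====

-- exact value of the k-cool number encoded by m's bits
def vk (k : Int) (m : Nat) : Int :=
  if m = 0 then 0 else k * vk k (m / 2) + (m % 2 : Nat)
termination_by m
decreasing_by exact Nat.div_lt_self (Nat.pos_of_ne_zero (by assumption)) (by norm_num)

-- number of binary digits of m
def nb (m : Nat) : Nat :=
  if m = 0 then 0 else nb (m / 2) + 1
termination_by m
decreasing_by exact Nat.div_lt_self (Nat.pos_of_ne_zero (by assumption)) (by norm_num)

lemma kcAux_eq (k : Int) (m : Nat) : ∀ r p : Int, r % pvM = r →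
    kcAux k m r p = (r + p * vk k m) % pvM := by
  induction m using Nat.strong_induction_on with
  | _ m ih =>
    intro r p hr
    rw [kcAux, vk]
    by_cases h0 : m = 0
    · simp [h0, hr]
    · simp only [h0, if_false]
      rw [ih (m / 2) (Nat.div_lt_self (Nat.pos_of_ne_zero h0) (by norm_num)) _ _
        (by by_cases hp : m % 2 = 1 <;> simp [hp, hr, Int.emod_emod_of_dvd])]
      by_cases hp : m % 2 = 1
      · simp only [hp, if_true]
        have e : r + p * (k * vk k (m / 2) + ((1:Nat) : Int)) =
            (r + p) + p * k * vk k (m / 2) := by push_cast; ring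
        rw [e]
        exact Int.ModEq.add (Int.emod_emod_of_dvd _ dvd_rfl)
          (Int.ModEq.mul_right _ (Int.emod_emod_of_dvd _ dvd_rfl))
      · have hp0 : m % 2 = 0 := by omega
        simp only [hp0]
        have e : r + p * (k * vk k (m / 2) + ((0:Nat) : Int)) =
            r + p * k * vk k (m / 2) := by push_cast; ring
        rw [e]
        exact Int.ModEq.add_left _ (Int.ModEq.mul_right _ (Int.emod_emod_of_dvd _ dvd_rfl))

lemma foldl_eq (k : Int) (m : Nat) : ∀ r : Int, r % pvM = r →
    (msbBits m).foldl (hstep k) r = (r * k ^ nb m + vk k m) % pvM := by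
  induction m using Nat.strong_induction_on with
  | _ m ih =>
    intro r hr
    rw [msbBits, vk, nb]
    by_cases h0 : m = 0
    · simp [h0, hr]
    · simp only [h0, if_false, List.foldl_append, List.foldl_cons, List.foldl_nil]
      rw [ih (m / 2) (Nat.div_lt_self (Nat.pos_of_ne_zero h0) (by norm_num)) r hr, hstep]
      have e : r * k ^ (nb (m / 2) + 1) + (k * vk k (m / 2) + ((m % 2 : Nat) : Int)) =
          (r * k ^ nb (m / 2) + vk k (m / 2)) * k + ((m % 2 : Nat) : Int) := by ring
      rw [e]
      have hb : (if decide (m % 2 = 1) = true then (1:Int) else 0) = ((m % 2 : Nat) : Int) := by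
        by_cases hp : m % 2 = 1 <;> simp [hp] <;> omega
      rw [hb]
      exact Int.ModEq.add_right _ (Int.ModEq.mul_right _ (Int.emod_emod_of_dvd _ dvd_rfl))

-- ===== VERDICT (by name: the statement is the Claim_ definition above) =====
theorem k_cool_spec : Claim_equal_k_cool := by
  intro k n _
  unfold Spec_k_cool k_cool k_cool_alt
  by_cases hn : n ≤ 0
  · have : n.toNat = 0 := Int.toNat_of_nonpos hn
    simp [hn, this, kcAux]
  · simp only [hn, if_false]
    rw [kcAux_eq k n.toNat 0 1 (by decide), foldl_eq k n.toNat 0 (by decide)]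
    ring_nf
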